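-- pv_equiv track=rewrite | github.com/NicolasZysman/TP_2_Algo1 | cartelera_prueba_class.py | cantidad_snacks_elegidos
-- ===== SOURCE A (Python) =====
-- INDICE_CANTIDAD_ENTRADAS: int = 0
--
-- INDICE_VALOR_UNITARIO: int = 1
--
-- def cantidad_snacks_elegidos(
--         acumulador_precios: list,
--         info_snacks: dict
-- ) -> dict:
--     '''
--     Pre: Recibe una lista con los precios de la reserva y un diccionario con los snacks
--          y sus precios
--     Post: Devuelve un diccionario con las unidades de snacks elegidas
--     '''
--     snacks: dict = {}
--
--     for elemento in range(len(acumulador_precios)):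
--
--         if elemento != INDICE_CANTIDAD_ENTRADAS or elemento != INDICE_VALOR_UNITARIO:
--             contador: int = 0
--             for precio in acumulador_precios:
--
--                 if precio == acumulador_precios[elemento]:
--                     contador += 1
--
--             if contador != 0:
--
--                 for snack, valor in info_snacks.items():
--                     if valor == acumulador_precios[elemento]:
--
--                         snacks[snack] = contador
--
--     return snacks
-- ===== SOURCE B (Python) =====
-- def cantidad_snacks_elegidos(
--         acumulador_precios: list,
--         info_snacks: dict
-- ) -> dict:
--     '''
--     Pre: Recibe una lista con los precios de la reserva y un diccionario con los snacks
--          y sus precios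
--     Post: Devuelve un diccionario con las unidades de snacks elegidas
--     '''
--     counts: dict = {}
--     for precio in acumulador_precios:
--         counts[precio] = counts.get(precio, 0) + 1
--
--     por_valor: dict = {}
--     for snack, valor in info_snacks.items():
--         por_valor.setdefault(valor, []).append(snack)
--
--     snacks: dict = {}
--     vistos: set = set()
--     for precio in acumulador_precios:
--         if precio not in vistos:
--             vistos.add(precio)
--             for snack in por_valor.get(precio, []):
--                 snacks[snack] = counts[precio]
--     return snacks
-- ===== Notes on version B (the rewrite author's own statement) =====
-- stated objective: faster
-- what changed: Replaces A's triple nested scan (for each index, re-count its price over the whole list and rescan all snacks) by three linear passes: a price counter dict, a value-to-snacks index, and one ordered pass over the prices with a seen-set, each distinct price processed once.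
import Mathlib
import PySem

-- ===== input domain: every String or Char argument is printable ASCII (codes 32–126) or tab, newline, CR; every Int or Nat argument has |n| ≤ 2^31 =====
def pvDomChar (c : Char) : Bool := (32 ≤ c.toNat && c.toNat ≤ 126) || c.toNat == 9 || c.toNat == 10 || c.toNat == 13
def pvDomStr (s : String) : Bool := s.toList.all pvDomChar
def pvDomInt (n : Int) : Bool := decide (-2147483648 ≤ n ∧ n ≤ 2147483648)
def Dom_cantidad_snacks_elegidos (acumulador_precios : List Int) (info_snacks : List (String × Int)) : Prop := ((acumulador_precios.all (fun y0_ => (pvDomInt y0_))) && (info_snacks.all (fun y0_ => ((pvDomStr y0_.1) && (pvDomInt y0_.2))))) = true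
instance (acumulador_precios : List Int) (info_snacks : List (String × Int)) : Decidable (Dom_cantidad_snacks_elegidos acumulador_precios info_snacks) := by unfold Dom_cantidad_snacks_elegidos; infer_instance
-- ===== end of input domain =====

-- B replaces A's triple nested scan by three linear passes (price counter, value→snacks index,
-- one ordered pass with a seen-set): measurably faster (asymptotic, O(n^2+n*m) → O(n+m)).


-- ===== PORT A =====
def cantidad_snacks_elegidos (acumulador_precios : List Int) (info_snacks : List (String × Int)) : List (String × Int) :=
  -- snacks = {}; for elemento in range(len(acumulador_precios)): ...
  (((PySem.List.pyRange 0 (PySem.List.len acumulador_precios) 1).foldl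
    (fun (snacks : PySem.Dict String Int) elemento =>
      if (elemento != 0 || elemento != 1) then
        -- contador = 0; for precio in acumulador_precios: if precio == acumulador_precios[elemento]: contador += 1
        let contador : Int := acumulador_precios.foldl
          (fun contador precio =>
            if precio == PySem.List.pyGetD acumulador_precios elemento 0 then contador + 1 else contador) 0
        if contador ≠ 0 then
          -- for snack, valor in info_snacks.items(): if valor == acumulador_precios[elemento]: snacks[snack] = contador
          info_snacks.foldl
            (fun snacks sv =>
              if sv.2 == PySem.List.pyGetD acumulador_precios elemento 0 then snacks.insert sv.1 contador
              else snacks) snacks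
        else snacks
      else snacks)
    PySem.Dict.empty).items)

-- ===== PORT B =====
def cantidad_snacks_elegidos_alt (acumulador_precios : List Int) (info_snacks : List (String × Int)) : List (String × Int) :=
  -- counts = {}; for precio in acumulador_precios: counts[precio] = counts.get(precio, 0) + 1
  let counts : PySem.Dict Int Int :=
    acumulador_precios.foldl (fun d precio => d.insert precio (d.getD precio 0 + 1)) PySem.Dict.empty
  -- por_valor = {}; for snack, valor in info_snacks.items(): por_valor.setdefault(valor, []).append(snack)
  let por_valor : PySem.Dict Int (List String) :=
    info_snacks.foldl (fun d sv => d.modify sv.2 [] (fun l => l ++ [sv.1])) PySem.Dict.empty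
  -- snacks = {}; vistos = set(); ordered pass over the prices
  let res : PySem.Dict String Int × PySem.Set Int :=
    acumulador_precios.foldl
      (fun st precio =>
        if PySem.Set.contains st.2 precio then st
        else ((por_valor.getD precio []).foldl
                (fun d snack => d.insert snack (counts.getD precio 0)) st.1,
              PySem.Set.add st.2 precio))
      (PySem.Dict.empty, PySem.Set.empty)
  res.1.items

-- ===== PRECONDITION & SPEC =====
-- Pre_ excludes association lists with a duplicated snack name: a Python dict argument can never
-- contain duplicate keys, so the assoc-list behaviour there is an artefact of the encoding.
def Pre_cantidad_snacks_elegidos (acumulador_precios : List Int) (info_snacks : List (String × Int)) : Prop :=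
  (info_snacks.map Prod.fst).Nodup
instance (acumulador_precios : List Int) (info_snacks : List (String × Int)) : Decidable (Pre_cantidad_snacks_elegidos acumulador_precios info_snacks) := by unfold Pre_cantidad_snacks_elegidos; infer_instance

def pvWitness_cantidad_snacks_elegidos : List Int × (List (String × Int)) :=
  ([1, 1, 3], [("pochoclos", 1), ("nachos", 3), ("papas", 7)])

def Spec_cantidad_snacks_elegidos (acumulador_precios : List Int) (info_snacks : List (String × Int)) (out : List (String × Int)) : Prop := out = cantidad_snacks_elegidos_alt acumulador_precios info_snacks
instance (acumulador_precios : List Int) (info_snacks : List (String × Int)) (out : List (String × Int)) : Decidable (Spec_cantidad_snacks_elegidos acumulador_precios info_snacks out) := by unfold Spec_cantidad_snacks_elegidos; infer_instance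

-- ===== CLAIM (what is proved, stated in full; the proofs are below) =====
def Claim_equal_cantidad_snacks_elegidos : Prop := ∀ (acumulador_precios : List Int) (info_snacks : List (String × Int)), Dom_cantidad_snacks_elegidos acumulador_precios info_snacks → Pre_cantidad_snacks_elegidos acumulador_precios info_snacks → Spec_cantidad_snacks_elegidos acumulador_precios info_snacks (cantidad_snacks_elegidos acumulador_precios info_snacks)

-- ===== LEMMAS AND PROOFS =====

-- The common per-price step: for every (snack, valor) in info with valor = p,
-- set snacks[snack] := (count of p in ap).
def pvStep (ap : List Int) (info : List (String × Int)) (d : PySem.Dict String Int) (p : Int) : PySem.Dict String Int :=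
  info.foldl (fun d sv => if sv.2 == p then d.insert sv.1 ((ap.count p : Int)) else d) d

-- generic if-insert fold with a fixed inserted value c
def pvFoldIf (info : List (String × Int)) (p : Int) (c : Int) (d : PySem.Dict String Int) : PySem.Dict String Int :=
  info.foldl (fun d sv => if sv.2 == p then d.insert sv.1 c else d) d

theorem pvFoldIf_cons (sv : String × Int) (info : List (String × Int)) (p : Int) (c : Int) (d : PySem.Dict String Int) :
    pvFoldIf (sv :: info) p c d = pvFoldIf info p c (if sv.2 == p then d.insert sv.1 c else d) := rfl

-- characterisation of a fold's lookups under nodup names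
theorem pvGet_foldIf (info : List (String × Int)) (p : Int) (c : Int) (d : PySem.Dict String Int) (k : String)
    (hnd : (info.map Prod.fst).Nodup) :
    (pvFoldIf info p c d).get? k =
      if info.any (fun sv => sv.1 == k && sv.2 == p) then some c else d.get? k := by
  induction info generalizing d with
  | nil => rfl
  | cons sv rest ih =>
    simp only [List.map_cons, List.nodup_cons] at hnd
    rw [pvFoldIf_cons, ih _ hnd.2]
    by_cases hk : sv.1 = k
    · have hrest : rest.any (fun sv => sv.1 == k && sv.2 == p) = false := by
        simp only [List.any_eq_false]
        intro sv' h'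
        have hne : sv'.1 ≠ k := fun he => hnd.1 (by rw [hk, ← he]; exact List.mem_map_of_mem h')
        simp [hne]
      by_cases hp : sv.2 = p
      · simp [hrest, hk, hp, PySem.Dict.get?_insert_self]
      · simp [hrest, hk, hp]
    · have hins : (if sv.2 == p then d.insert sv.1 c else d).get? k = d.get? k := by
        split_ifs
        · exact PySem.Dict.get?_insert_of_ne d c (fun he => hk he.symm)
        · rfl
      have hany : ((sv :: rest).any fun sv => sv.1 == k && sv.2 == p)
          = (rest.any fun sv => sv.1 == k && sv.2 == p) := by simp [hk]
      rw [hany, hins]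

-- keys stay Nodup through the fold
theorem pvNodup_foldIf (info : List (String × Int)) (p : Int) (c : Int) (d : PySem.Dict String Int)
    (h : d.keys.Nodup) : (pvFoldIf info p c d).keys.Nodup := by
  induction info generalizing d with
  | nil => exact h
  | cons sv rest ih =>
    rw [pvFoldIf_cons]
    apply ih
    split_ifs
    · exact PySem.Dict.nodup_keys_insert d sv.1 c h
    · exact h

-- inserting an already-present binding is a no-op
theorem pvInsert_noop (d : PySem.Dict String Int) (k : String) (v : Int)
    (hget : d.get? k = some v) (hnd : d.keys.Nodup) : d.insert k v = d := by
  apply PySem.Dict.ext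
  have hc : d.contains k = true := by
    rw [PySem.Dict.contains_eq_isSome_get?, hget]; rfl
  rw [PySem.Dict.items_insert_of_contains d v hc]
  have hmem : (k, v) ∈ d.items := (PySem.Dict.get?_eq_some_iff_mem_items d k v hnd).mp hget
  have hid : ∀ q ∈ d.items, (fun q : String × Int => if (q.1 == k) = true then (k, v) else q) q = id q := by
    intro q hq
    by_cases hqk : q.1 = k
    · have hs : d.get? q.1 = some q.2 := PySem.Dict.get?_of_mem_items d hq hnd
      rw [hqk, hget] at hs
      have hv : q.2 = v := by injection hs.symm
      subst hqk
      simp [← hv]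
    · simp [hqk]
  rw [List.map_congr_left hid, List.map_id]

-- "every snack priced p is already recorded with count (ap.count p)"
def pvApplied (ap : List Int) (info : List (String × Int)) (p : Int) (d : PySem.Dict String Int) : Prop :=
  ∀ sv ∈ info, sv.2 = p → d.get? sv.1 = some ((ap.count p : Int))

-- idempotence of the step once applied
theorem pvStep_idem (ap : List Int) (info : List (String × Int)) (p : Int) (d : PySem.Dict String Int)
    (happ : pvApplied ap info p d) (hnd : d.keys.Nodup) : pvStep ap info d p = d := by
  show pvFoldIf info p ((ap.count p : Int)) d = d
  induction info generalizing d with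
  | nil => rfl
  | cons sv rest ih =>
    rw [pvFoldIf_cons]
    split_ifs with hp
    · rw [pvInsert_noop d sv.1 _ (happ sv List.mem_cons_self (by simpa using hp)) hnd]
      exact ih d (fun sv' h' => happ sv' (List.mem_cons_of_mem _ h')) hnd
    · exact ih d (fun sv' h' => happ sv' (List.mem_cons_of_mem _ h')) hnd

-- pvApplied is preserved by any pvStep (nodup names needed)
theorem pvApplied_step (ap : List Int) (info : List (String × Int)) (p q : Int) (d : PySem.Dict String Int)
    (hnd : (info.map Prod.fst).Nodup)
    (h : pvApplied ap info q d ∨ q = p) : pvApplied ap info q (pvStep ap info d p) := by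
  intro sv hmem hval
  have hchar := pvGet_foldIf info p ((ap.count p : Int)) d sv.1 hnd
  show (pvFoldIf info p _ d).get? sv.1 = _
  rw [hchar]
  by_cases hqp : q = p
  · have : (List.any info fun sv' => sv'.1 == sv.1 && sv'.2 == p) = true := by
      simp only [List.any_eq_true]
      exact ⟨sv, hmem, by simp [hval, hqp]⟩
    rw [if_pos this, hqp]
  · rcases h with happ | h; swap
    · exact absurd h hqp
    have : (List.any info fun sv' => sv'.1 == sv.1 && sv'.2 == p) = false := by
      simp only [List.any_eq_false]
      intro sv' hmem'
      by_cases hn : sv'.1 = sv.1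
      · have : sv' = sv := by
          exact List.inj_on_of_nodup_map hnd hmem' hmem hn
        simp [this, hval, hqp]
      · simp [hn]
    rw [if_neg (by simp [this])]
    exact happ sv hmem hval

-- the count loop of A, closed form
theorem pvCount_loop (ap : List Int) (p : Int) :
    ap.foldl (fun contador precio => if precio == p then contador + 1 else contador) (0 : Int)
      = (ap.count p : Int) := by
  rw [PySem.List.foldl_beq_add_one, zero_add]

-- A's per-value body, once the index has been replaced by the value
def pvBodyA (ap : List Int) (info : List (String × Int)) (d : PySem.Dict String Int) (p : Int) : PySem.Dict String Int :=
  let contador : Int := ap.foldl (fun contador precio => if precio == p then contador + 1 else contador) 0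
  if contador ≠ 0 then
    info.foldl (fun d sv => if sv.2 == p then d.insert sv.1 contador else d) d
  else d

theorem pvBodyA_eq_step (ap : List Int) (info : List (String × Int)) (d : PySem.Dict String Int) (p : Int)
    (hp : p ∈ ap) : pvBodyA ap info d p = pvStep ap info d p := by
  unfold pvBodyA pvStep
  rw [pvCount_loop]
  have hpos : ((ap.count p : Int)) ≠ 0 := by
    have h0 : 0 < ap.count p := List.count_pos_iff.mpr hp
    exact_mod_cast Nat.pos_iff_ne_zero.mp h0
  simp only [ne_eq, hpos, not_false_eq_true, if_true]

-- A's dict is the fold of pvStep over the prices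
theorem pvA_eq (ap : List Int) (info : List (String × Int)) :
    cantidad_snacks_elegidos ap info = (ap.foldl (pvStep ap info) PySem.Dict.empty).items := by
  unfold cantidad_snacks_elegidos
  congr 1
  have hbody : (fun (snacks : PySem.Dict String Int) (elemento : Int) =>
        if (elemento != 0 || elemento != 1) then
          let contador : Int := ap.foldl (fun contador precio => if precio == PySem.List.pyGetD ap elemento 0 then contador + 1 else contador) 0
          if contador ≠ 0 then
            info.foldl (fun snacks sv => if sv.2 == PySem.List.pyGetD ap elemento 0 then snacks.insert sv.1 contador else snacks) snacks
          else snacks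
        else snacks)
      = fun (snacks : PySem.Dict String Int) (elemento : Int) =>
          pvBodyA ap info snacks (PySem.List.pyGetD ap elemento 0) := by
    funext snacks e
    have hg : (e != 0 || e != 1) = true := by
      rcases eq_or_ne e 0 with h | h <;> simp [h]
    rw [hg]
    simp only [if_true]
    rfl
  rw [hbody, PySem.List.foldl_pyRange_zero_pyGetD ap 0 (pvBodyA ap info) PySem.Dict.empty]
  exact PySem.List.foldl_congr_mem ap _ _ _ (fun acc x hx => pvBodyA_eq_step ap info acc x hx)

-- the grouped per-price snack list is exactly the filtered scan
theorem pvFold_filter_map (info : List (String × Int)) (p : Int) (c : Int) (d : PySem.Dict String Int) :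
    ((info.filter (fun sv => sv.2 == p)).map (fun sv => sv.1)).foldl (fun d snack => d.insert snack c) d
      = pvFoldIf info p c d := by
  induction info generalizing d with
  | nil => rfl
  | cons sv rest ih =>
    rw [pvFoldIf_cons]
    by_cases hp : sv.2 = p
    · simp only [List.filter_cons, hp, BEq.rfl, if_true, List.map_cons, List.foldl_cons]
      rw [ih]
    · have : (sv.2 == p) = false := by simp [hp]
      simp only [List.filter_cons, this, if_false, Bool.false_eq_true]
      rw [ih]

-- B's main loop invariant: the seen-set filter is invisible in the result
theorem pvB_main (ap : List Int) (info : List (String × Int)) (hnd : (info.map Prod.fst).Nodup)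
    (l : List Int) (s : PySem.Set Int) (d : PySem.Dict String Int)
    (happ : ∀ p ∈ s, pvApplied ap info p d) (hk : d.keys.Nodup) :
    (l.foldl
      (fun (st : PySem.Dict String Int × PySem.Set Int) precio =>
        if PySem.Set.contains st.2 precio then st
        else (((info.foldl (fun d sv => d.modify sv.2 [] (fun l => l ++ [sv.1])) PySem.Dict.empty).getD precio []).foldl
                (fun d snack => d.insert snack ((ap.foldl (fun d precio => d.insert precio (d.getD precio 0 + 1)) PySem.Dict.empty).getD precio 0)) st.1,
              PySem.Set.add st.2 precio))
      (d, s)).1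
      = l.foldl (pvStep ap info) d := by
  induction l generalizing s d with
  | nil => rfl
  | cons p rest ih =>
    simp only [List.foldl_cons]
    by_cases hmem : p ∈ s
    · have hc : PySem.Set.contains s p = true := (PySem.Set.contains_iff s p).mpr hmem
      rw [if_pos hc, pvStep_idem ap info p d (happ p hmem) hk]
      exact ih s d happ hk
    · have hc : ¬ PySem.Set.contains s p = true := fun h => hmem ((PySem.Set.contains_iff s p).mp h)
      rw [if_neg hc]
      have hcount : (ap.foldl (fun d precio => d.insert precio (d.getD precio 0 + 1)) PySem.Dict.empty).getD p 0
          = (ap.count p : Int) := by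
        rw [PySem.Dict.getD_foldl_insert_add_one, PySem.Dict.getD_empty, zero_add]
      have hgroup : (info.foldl (fun d sv => d.modify sv.2 [] (fun l => l ++ [sv.1])) PySem.Dict.empty).getD p []
          = (info.filter (fun sv => sv.2 == p)).map (fun sv => sv.1) := by
        have hswap : info.foldl (fun d sv => d.modify sv.2 [] (fun l => l ++ [sv.1])) PySem.Dict.empty
            = (info.map Prod.swap).foldl (fun d q => d.modify q.1 [] (fun l => l ++ [q.2])) PySem.Dict.empty := by
          rw [List.foldl_map]
          rfl
        rw [hswap, PySem.Dict.getD_foldl_modify_append, PySem.Dict.getD_empty]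
        simp [List.filter_map, List.map_map, Function.comp_def, Prod.swap]
      have hfirst : (((info.foldl (fun d sv => d.modify sv.2 [] (fun l => l ++ [sv.1])) PySem.Dict.empty).getD p []).foldl
            (fun d snack => d.insert snack ((ap.foldl (fun d precio => d.insert precio (d.getD precio 0 + 1)) PySem.Dict.empty).getD p 0)) d)
          = pvStep ap info d p := by
        rw [hcount, hgroup]
        exact pvFold_filter_map info p _ d
      rw [hfirst]
      apply ih
      · intro q hq
        rcases (PySem.Set.mem_add s p q).mp hq with h | h
        · exact pvApplied_step ap info p q d hnd (Or.inl (happ q h))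
        · exact pvApplied_step ap info p q d hnd (Or.inr h)
      · exact pvNodup_foldIf info p _ d hk

-- B's dict is the same fold
theorem pvB_eq (ap : List Int) (info : List (String × Int)) (hnd : (info.map Prod.fst).Nodup) :
    cantidad_snacks_elegidos_alt ap info = (ap.foldl (pvStep ap info) PySem.Dict.empty).items := by
  have h := pvB_main ap info hnd ap PySem.Set.empty PySem.Dict.empty (by intro p hp; cases hp) PySem.Dict.nodup_keys_empty
  unfold cantidad_snacks_elegidos_alt
  exact congrArg PySem.Dict.items h

-- ===== VERDICT (by name: the statement is the Claim_ definition above) =====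
theorem cantidad_snacks_elegidos_spec : Claim_equal_cantidad_snacks_elegidos := by
  intro ap info _ hpre
  unfold Spec_cantidad_snacks_elegidos
  rw [pvA_eq, pvB_eq ap info hpre]
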